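-- pv_equiv track=rewrite | github.com/hitnq/analyse_bert | get/get_query_para_coreference.py | get_char_of_token
-- ===== SOURCE A (Python) =====
-- def is_whitespace(c):
--     if c == " " or c == "\t" or c == "\r" or c == "\n" or ord(c) == 0x202F:
--         return True
--     return False
--
-- def get_char_of_token(sentence):
--     doc_tokens_original = []
--     char_to_word_offset_origin = []
--     pre_is_white_space = True
--     for c in sentence:
--         if is_whitespace(c):
--             pre_is_white_space = True
--         else:
--             if pre_is_white_space:
--                 doc_tokens_original.append(c)
--             else:
--                 doc_tokens_original[-1] += c
--             pre_is_white_space = False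
--         char_to_word_offset_origin.append(len(doc_tokens_original) - 1)
--     return doc_tokens_original,char_to_word_offset_origin
-- ===== SOURCE B (Python) =====
-- def is_whitespace(c):
--     return c in " \t\r\n" or ord(c) == 0x202F
--
--
-- def get_char_of_token(sentence):
--     # run-grouping: scan maximal runs of same whitespace-ness instead of a
--     # per-character state machine
--     tokens = []
--     offsets = []
--     i, n = 0, len(sentence)
--     while i < n:
--         ws = is_whitespace(sentence[i])
--         j = i + 1
--         while j < n and is_whitespace(sentence[j]) == ws:
--             j += 1
--         if not ws:
--             tokens.append(sentence[i:j])
--         offsets.extend([len(tokens) - 1] * (j - i))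
--         i = j
--     return tokens, offsets
-- ===== Notes on version B (the rewrite author's own statement) =====
-- stated objective: faster
-- what changed: A's per-character loop with a previous-was-whitespace boolean state machine is replaced by a scan over maximal runs of equal whitespace-ness: each run yields one token by slicing (if non-whitespace) and extends the offsets by len(run) copies of the current last-token index in one step, eliminating the repeated toks[-1] += c string re-concatenation.
import Mathlib
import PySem

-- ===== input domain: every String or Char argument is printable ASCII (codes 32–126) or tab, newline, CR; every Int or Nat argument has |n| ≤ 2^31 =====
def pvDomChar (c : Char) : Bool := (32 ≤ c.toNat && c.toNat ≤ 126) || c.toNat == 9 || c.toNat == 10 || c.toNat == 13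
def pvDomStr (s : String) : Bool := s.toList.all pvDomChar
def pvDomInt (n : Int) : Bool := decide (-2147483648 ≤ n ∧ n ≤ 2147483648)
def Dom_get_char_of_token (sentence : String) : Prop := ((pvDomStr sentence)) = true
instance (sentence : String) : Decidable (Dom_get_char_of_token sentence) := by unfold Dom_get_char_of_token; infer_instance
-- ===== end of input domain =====

-- B replaces A's per-character previous-was-whitespace state machine by a scan over
-- maximal runs of equal whitespace-ness, slicing one token per run instead of repeated
-- last-token string concatenation (objective: faster; measured).
-- Python strings under construction are represented as List Char (String.ofList at return).

-- ===== PORT A =====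
def is_whitespace (c : Char) : Bool :=
  if c == ' ' || c == '\t' || c == '\r' || c == '\n' || c.toNat == 0x202F then true else false

-- Python `doc_tokens_original[-1] += c`; the [] case is unreachable (pre = false ⇒ toks ≠ [])
def appendLast (toks : List (List Char)) (c : Char) : List (List Char) :=
  match toks with
  | [] => []
  | [t] => [t ++ [c]]
  | t :: ts => t :: appendLast ts c

def stepA (st : List (List Char) × List Int × Bool) (c : Char) :
    List (List Char) × List Int × Bool :=
  let toks := st.1
  let offs := st.2.1
  let pre := st.2.2
  if is_whitespace c then
    (toks, offs ++ [(toks.length : Int) - 1], true)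
  else
    let toks' := if pre then toks ++ [[c]] else appendLast toks c
    (toks', offs ++ [(toks'.length : Int) - 1], false)

def get_char_of_token (sentence : String) : List String × List Int :=
  let st := sentence.toList.foldl stepA ([], [], true)
  (st.1.map (fun t => String.ofList t), st.2.1)

-- ===== PORT B =====
def is_whitespace_b (c : Char) : Bool :=
  (" \t\r\n".toList.contains c) || c.toNat == 0x202F

-- one maximal run of equal whitespace-ness per recursive call (Source B's outer while loop)
def altGo (cs : List Char) (toks : List (List Char)) (offs : List Int) :
    List (List Char) × List Int :=
  match cs with
  | [] => (toks, offs)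
  | c :: cs' =>
    let ws := is_whitespace_b c
    let run := (c :: cs').takeWhile (fun x => is_whitespace_b x == ws)
    let rest := (c :: cs').dropWhile (fun x => is_whitespace_b x == ws)
    let toks' := if ws then toks else toks ++ [run]
    altGo rest toks' (offs ++ List.replicate run.length ((toks'.length : Int) - 1))
termination_by cs.length
decreasing_by
  simp only [List.dropWhile, beq_self_eq_true]
  exact Nat.lt_succ_of_le (List.length_dropWhile_le _ _)

def get_char_of_token_alt (sentence : String) : List String × List Int :=
  let r := altGo sentence.toList [] []
  (r.1.map (fun t => String.ofList t), r.2)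

-- ===== PRECONDITION & SPEC =====
def Spec_get_char_of_token (sentence : String) (out : List String × List Int) : Prop := out = get_char_of_token_alt sentence
instance (sentence : String) (out : List String × List Int) : Decidable (Spec_get_char_of_token sentence out) := by unfold Spec_get_char_of_token; infer_instance

-- ===== CLAIM (what is proved, stated in full; the proofs are below) =====
def Claim_equal_get_char_of_token : Prop := ∀ (sentence : String), Dom_get_char_of_token sentence → Spec_get_char_of_token sentence (get_char_of_token sentence)

-- ===== LEMMAS AND PROOFS =====

theorem isws_eq (c : Char) : is_whitespace_b c = is_whitespace c := by
  have h : (" \t\r\n".toList) = [' ', '\t', '\r', '\n'] := rfl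
  simp only [is_whitespace_b, is_whitespace, h, List.contains_cons, List.contains_nil]
  cases hc : (c == ' ' || c == '\t' || c == '\r' || c == '\n' || c.toNat == 0x202F)
  · simp_all
  · simp_all; tauto

theorem appendLast_eq (toks : List (List Char)) (t : List Char) (c : Char) :
    appendLast (toks ++ [t]) c = toks ++ [t ++ [c]] := by
  induction toks with
  | nil => rfl
  | cons h ts ih =>
      cases ts with
      | nil => simp [appendLast]
      | cons h2 ts2 => simp only [List.cons_append, appendLast] at ih ⊢; rw [ih]

theorem foldA_ws (run : List Char) (h : ∀ c ∈ run, is_whitespace c = true) :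
    ∀ toks offs pre, run.foldl stepA (toks, offs, pre)
      = (toks, offs ++ List.replicate run.length ((toks.length : Int) - 1),
         if run.isEmpty then pre else true) := by
  induction run with
  | nil => intro toks offs pre; simp
  | cons c run' ih =>
      intro toks offs pre
      have hc : is_whitespace c = true := h c (by simp)
      simp only [List.foldl_cons, stepA, hc, if_pos]
      rw [ih (fun x hx => h x (by simp [hx]))]
      simp [List.replicate_succ]

theorem foldA_nonws_inner (run : List Char) (h : ∀ c ∈ run, is_whitespace c = false) :
    ∀ (toks : List (List Char)) t offs, run.foldl stepA (toks ++ [t], offs, false)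
      = (toks ++ [t ++ run], offs ++ List.replicate run.length ((toks.length : Int)), false) := by
  induction run with
  | nil => intro toks t offs; simp
  | cons c run' ih =>
      intro toks t offs
      have hc : is_whitespace c = false := h c (by simp)
      simp only [List.foldl_cons, stepA, hc, Bool.false_eq_true, if_neg, not_false_iff]
      rw [appendLast_eq]
      rw [ih (fun x hx => h x (by simp [hx]))]
      simp [List.replicate_succ, List.append_assoc]

theorem foldA_nonws (c : Char) (run : List Char)
    (h : ∀ x ∈ c :: run, is_whitespace x = false) (toks : List (List Char)) (offs : List Int) :
    (c :: run).foldl stepA (toks, offs, true)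
      = (toks ++ [c :: run], offs ++ List.replicate (run.length + 1) ((toks.length : Int)), false) := by
  have hc : is_whitespace c = false := h c (by simp)
  simp only [List.foldl_cons, stepA, hc, Bool.false_eq_true, if_neg, if_pos, not_false_iff]
  rw [foldA_nonws_inner run (fun x hx => h x (by simp [hx]))]
  simp [List.replicate_succ]

theorem main_lemma (n : Nat) : ∀ cs : List Char, cs.length ≤ n →
    ∀ toks offs pre, (pre = false → cs.head?.all is_whitespace = true) →
    (((cs.foldl stepA (toks, offs, pre)).1, (cs.foldl stepA (toks, offs, pre)).2.1)
      : List (List Char) × List Int) = altGo cs toks offs := by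
  induction n with
  | zero =>
      intro cs hlen toks offs pre _
      have : cs = [] := List.eq_nil_of_length_eq_zero (Nat.le_zero.mp hlen)
      subst this; simp [altGo]
  | succ n ih =>
      intro cs hlen toks offs pre hpre
      match cs with
      | [] => simp [altGo]
      | c :: cs' =>
        have hp : (fun x => is_whitespace_b x == is_whitespace_b c)
            = (fun x => is_whitespace x == is_whitespace c) := by
          funext x; rw [isws_eq, isws_eq]
        have hrw : altGo (c :: cs') toks offs =
            altGo ((c :: cs').dropWhile (fun x => is_whitespace x == is_whitespace c))
              (if is_whitespace c then toks
               else toks ++ [(c :: cs').takeWhile (fun x => is_whitespace x == is_whitespace c)])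
              (offs ++ List.replicate
                ((c :: cs').takeWhile (fun x => is_whitespace x == is_whitespace c)).length
                (((if is_whitespace c then toks
                   else toks ++ [(c :: cs').takeWhile
                     (fun x => is_whitespace x == is_whitespace c)]).length : Int) - 1)) := by
          rw [altGo]; rw [hp, isws_eq]
        set q := fun x => is_whitespace x == is_whitespace c with hq
        have hqc : q c = true := by simp [hq]
        have hsplit : (c :: cs').takeWhile q ++ (c :: cs').dropWhile q = c :: cs' :=
          List.takeWhile_append_dropWhile
        have hrest : (c :: cs').dropWhile q = cs'.dropWhile q := by
          rw [List.dropWhile_cons, if_pos hqc]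
        have hrestlen : ((c :: cs').dropWhile q).length ≤ n := by
          rw [hrest]
          exact le_trans (List.length_dropWhile_le _ _) (Nat.le_of_succ_le_succ hlen)
        have hrun : (c :: cs').takeWhile q = c :: cs'.takeWhile q := by
          rw [List.takeWhile_cons, if_pos hqc]
        have hresthd : ∀ r, ((c :: cs').dropWhile q).head? = some r → q r = false := by
          intro r hr
          have := List.head?_dropWhile_not q (c :: cs')
          rw [hr] at this; exact this
        by_cases hws : is_whitespace c = true
        · -- whitespace run
          have hall : ∀ x ∈ (c :: cs').takeWhile q, is_whitespace x = true := by
            intro x hx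
            have := List.mem_takeWhile_imp hx
            simp [hq, hws] at this; simp [this]
          conv_lhs => rw [← hsplit]
          rw [List.foldl_append, foldA_ws _ hall, hrw, if_pos hws]
          have hne : ((c :: cs').takeWhile q).isEmpty = false := by rw [hrun]; rfl
          rw [hne]
          exact ih _ hrestlen _ _ _ (by simp)
        · -- non-whitespace run
          have hwsf : is_whitespace c = false := by simpa using hws
          have hpre' : pre = true := by
            cases pre
            · have := hpre rfl; simp [hwsf] at this
            · rfl
          subst hpre'
          have hall : ∀ x ∈ (c :: cs').takeWhile q, is_whitespace x = false := by
            intro x hx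
            have := List.mem_takeWhile_imp hx
            simp [hq, hwsf] at this; simp [this]
          rw [hrun] at hall
          conv_lhs => rw [← hsplit]
          rw [hrun, List.foldl_append, foldA_nonws c _ (by
            intro x hx; exact hall x (by simpa [hrun] using hx)), hrw, if_neg (by simp [hwsf])]
          rw [hrun]
          have hlen2 : ((toks ++ [c :: cs'.takeWhile q]).length : Int) - 1 = (toks.length : Int) := by
            simp
          rw [hlen2]
          have := ih _ hrestlen (toks ++ [c :: cs'.takeWhile q])
            (offs ++ List.replicate (cs'.takeWhile q).length (toks.length : Int)
              ++ [(toks.length : Int)]) false (by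
                cases hcase : ((c :: cs').dropWhile q).head? with
                | none => simp
                | some r =>
                    have := hresthd r hcase
                    simp [hq, hwsf] at this
                    simp [this])
          simp only [List.length_cons, List.replicate_succ'] at this ⊢
          simpa only [List.append_assoc] using this

-- ===== VERDICT (by name: the statement is the Claim_ definition above) =====
theorem get_char_of_token_spec : Claim_equal_get_char_of_token := by
  intro s _
  unfold Spec_get_char_of_token get_char_of_token get_char_of_token_alt
  have h := main_lemma s.toList.length s.toList (le_refl _) [] [] true (by simp)
  rw [← h]
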